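-- pv_equiv track=rewrite | github.com/muskanb428/transcriptional-slippage | results/codon_slippage_metrics.py | find_aa_homopolymers
-- ===== SOURCE A (Python) =====
-- from typing import Dict, List, Tuple, Optional, Set
--
-- def find_aa_homopolymers(protein: str, min_run: int) -> List[Tuple[int, int, str]]:
--     runs: List[Tuple[int, int, str]] = []
--     i = 0
--     while i < len(protein):
--         aa = protein[i]
--         j = i + 1
--         while j < len(protein) and protein[j] == aa:
--             j += 1
--         if aa != "X" and (j - i) >= min_run:
--             runs.append((i, j, aa))
--         i = j
--     return runs
-- ===== SOURCE B (Python) =====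
-- from typing import Dict, List, Tuple, Optional, Set
--
-- def find_aa_homopolymers(protein: str, min_run: int) -> List[Tuple[int, int, str]]:
--     n = len(protein)
--     starts = [i for i in range(n) if i == 0 or protein[i] != protein[i - 1]]
--     ends = starts[1:] + [n]
--     return [(a, b, protein[a])
--             for a, b in zip(starts, ends)
--             if protein[a] != "X" and b - a >= min_run]
-- ===== Notes on version B (the rewrite author's own statement) =====
-- stated objective: alternative
-- what changed: Replaces A's nested-while index walk with staged passes: a range comprehension collects the run-start boundary indices, zip pairs each start with the next boundary (or the string length), and a final comprehension filters and emits the tuples.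
import Mathlib
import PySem

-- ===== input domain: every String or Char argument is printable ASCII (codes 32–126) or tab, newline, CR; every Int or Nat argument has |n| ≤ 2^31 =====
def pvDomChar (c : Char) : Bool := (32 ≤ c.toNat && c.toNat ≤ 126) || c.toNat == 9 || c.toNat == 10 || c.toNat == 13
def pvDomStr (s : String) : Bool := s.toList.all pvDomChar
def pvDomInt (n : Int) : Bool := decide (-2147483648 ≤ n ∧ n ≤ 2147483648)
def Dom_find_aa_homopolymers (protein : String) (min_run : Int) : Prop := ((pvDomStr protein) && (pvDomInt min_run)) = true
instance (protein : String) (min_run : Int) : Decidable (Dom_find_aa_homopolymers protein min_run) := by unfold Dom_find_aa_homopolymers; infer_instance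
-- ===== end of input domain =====

-- B replaces A's nested-while scan by staged passes: first compute the list of run-start
-- boundary indices by a range comprehension, then pair consecutive boundaries with zip and
-- filter the pairs (alternative decomposition, same O(n) cost).


-- ===== PORT A =====
-- inner while: number of leading chars of the list equal to aa
def pvCountLead (aa : Char) : List Char → Nat
  | [] => 0
  | b :: t => if b = aa then pvCountLead aa t + 1 else 0

theorem pvCountLead_le (aa : Char) (cs : List Char) : pvCountLead aa cs ≤ cs.length := by
  induction cs with
  | nil => simp [pvCountLead]
  | cons b t ih =>
    simp only [pvCountLead]
    split
    · simp only [List.length_cons]; omega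
    · simp

-- outer while of A: cs is protein[i:], i the current index
def pvLoopA (min_run : Int) (cs : List Char) (i : Int) : List (Int × Int × String) :=
  match cs with
  | [] => []
  | aa :: rest =>
    let k := pvCountLead aa rest          -- inner while advanced j = i + 1 + k
    let j := i + 1 + (k : Int)
    let tail := pvLoopA min_run (rest.drop k) j
    if aa ≠ 'X' ∧ j - i ≥ min_run then (i, j, String.ofList [aa]) :: tail else tail
termination_by cs.length
decreasing_by
  have := pvCountLead_le aa rest
  simp [List.length_drop]

def find_aa_homopolymers (protein : String) (min_run : Int) : List (Int × Int × String) :=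
  pvLoopA min_run protein.toList 0

-- ===== PORT B =====
-- starts = [i for i in range(n) if i == 0 or protein[i] != protein[i-1]]
-- (indices taken by comprehension are always in range, so getD's default is never used)
def pvStarts (cs : List Char) : List Nat :=
  (List.range cs.length).filter (fun i => decide (i = 0 ∨ cs.getD i 'A' ≠ cs.getD (i - 1) 'A'))

def find_aa_homopolymers_alt (protein : String) (min_run : Int) : List (Int × Int × String) :=
  let cs := protein.toList
  let starts := pvStarts cs
  let ends := starts.drop 1 ++ [cs.length]
  (starts.zip ends).filterMap (fun p =>
    if cs.getD p.1 'A' ≠ 'X' ∧ (p.2 : Int) - (p.1 : Int) ≥ min_run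
    then some ((p.1 : Int), (p.2 : Int), String.ofList [cs.getD p.1 'A'])
    else none)

-- ===== PRECONDITION & SPEC =====
def Spec_find_aa_homopolymers (protein : String) (min_run : Int) (out : List (Int × Int × String)) : Prop := out = find_aa_homopolymers_alt protein min_run
instance (protein : String) (min_run : Int) (out : List (Int × Int × String)) : Decidable (Spec_find_aa_homopolymers protein min_run out) := by unfold Spec_find_aa_homopolymers; infer_instance

-- ===== CLAIM (what is proved, stated in full; the proofs are below) =====
def Claim_equal_find_aa_homopolymers : Prop := ∀ (protein : String) (min_run : Int), Dom_find_aa_homopolymers protein min_run → Spec_find_aa_homopolymers protein min_run (find_aa_homopolymers protein min_run)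

-- ===== LEMMAS AND PROOFS =====

-- the zipped (start, end) pairs of B, as a named helper for the proofs
def pvPairs (cs : List Char) : List (Nat × Nat) :=
  (pvStarts cs).zip ((pvStarts cs).drop 1 ++ [cs.length])

def pvF (cs : List Char) (min_run : Int) (p : Nat × Nat) : Option (Int × Int × String) :=
  if cs.getD p.1 'A' ≠ 'X' ∧ (p.2 : Int) - (p.1 : Int) ≥ min_run
  then some ((p.1 : Int), (p.2 : Int), String.ofList [cs.getD p.1 'A'])
  else none

theorem alt_eq (protein : String) (min_run : Int) :
    find_aa_homopolymers_alt protein min_run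
      = (pvPairs protein.toList).filterMap (pvF protein.toList min_run) := by
  rfl

theorem pvCountLead_getD_lt (aa : Char) (rest : List Char) (i : Nat) (d : Char)
    (h : i < pvCountLead aa rest) : rest.getD i d = aa := by
  induction rest generalizing i with
  | nil => simp [pvCountLead] at h
  | cons b t ih =>
    simp only [pvCountLead] at h
    by_cases hb : b = aa
    · rw [if_pos hb] at h
      cases i with
      | zero => simpa [hb]
      | succ m => simpa using ih m (by omega)
    · simp [hb] at h
  
theorem pvCountLead_getD_eq (aa : Char) (rest : List Char) (d : Char)
    (h : pvCountLead aa rest < rest.length) : rest.getD (pvCountLead aa rest) d ≠ aa := by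
  induction rest with
  | nil => simp at h
  | cons b t ih =>
    simp only [pvCountLead] at h ⊢
    by_cases hb : b = aa
    · rw [if_pos hb] at h ⊢
      simpa using ih (by simpa using h)
    · simpa [hb] using hb

theorem getD_drop (l : List Char) (k j : Nat) (d : Char) :
    (l.drop k).getD j d = l.getD (k + j) d := by
  simp [List.getD_eq_getElem?_getD, List.getElem?_drop]

theorem pvStarts_P_congr (aa : Char) (rest : List Char) (j : Nat)
    (hj : j < (rest.drop (pvCountLead aa rest)).length) :
    (decide (pvCountLead aa rest + 1 + j = 0 ∨
       (aa :: rest).getD (pvCountLead aa rest + 1 + j) 'A'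
         ≠ (aa :: rest).getD (pvCountLead aa rest + 1 + j - 1) 'A'))
      = (decide (j = 0 ∨
          (rest.drop (pvCountLead aa rest)).getD j 'A'
            ≠ (rest.drop (pvCountLead aa rest)).getD (j - 1) 'A')) := by
  set k := pvCountLead aa rest with hk
  have hklen : k < rest.length := by
    simp only [List.length_drop] at hj; omega
  cases j with
  | zero =>
    have h1 : (aa :: rest).getD (k + 1 + 0) 'A' = rest.getD k 'A' := by
      simp [List.getD_cons_succ]
    have h2 : (aa :: rest).getD (k + 1 + 0 - 1) 'A' = aa := by
      cases hkz : k with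
      | zero => simp
      | succ m =>
        have : rest.getD m 'A' = aa := pvCountLead_getD_lt aa rest m 'A' (by omega)
        simpa [List.getD_cons_succ] using this
    have h3 : rest.getD k 'A' ≠ aa := pvCountLead_getD_eq aa rest 'A' hklen
    rw [decide_eq_decide]
    constructor
    · intro _; exact Or.inl rfl
    · intro _
      refine Or.inr ?_
      rw [h1, h2]; exact h3
  | succ m =>
    have h1 : (aa :: rest).getD (k + 1 + (m + 1)) 'A' = (rest.drop k).getD (m + 1) 'A' := by
      rw [getD_drop]
      have : k + 1 + (m + 1) = (k + (m + 1)) + 1 := by omega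
      rw [this, List.getD_cons_succ]
    have h2 : (aa :: rest).getD (k + 1 + (m + 1) - 1) 'A' = (rest.drop k).getD m 'A' := by
      rw [getD_drop]
      have : k + 1 + (m + 1) - 1 = (k + m) + 1 := by omega
      rw [this, List.getD_cons_succ]
    rw [decide_eq_decide, h1, h2]
    have hm : m + 1 - 1 = m := rfl
    rw [hm]
    constructor
    · rintro (h0 | hne)
      · omega
      · exact Or.inr hne
    · rintro (h0 | hne)
      · omega
      · exact Or.inr hne

theorem pvStarts_cons (aa : Char) (rest : List Char) :
    pvStarts (aa :: rest)
      = 0 :: (pvStarts (rest.drop (pvCountLead aa rest))).map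
               (fun j => pvCountLead aa rest + 1 + j) := by
  set k := pvCountLead aa rest with hk
  have hkle : k ≤ rest.length := pvCountLead_le aa rest
  have hlen : (aa :: rest).length = (k + 1) + (rest.drop k).length := by
    simp [List.length_drop]; omega
  unfold pvStarts
  rw [hlen, List.range_add, List.filter_append, List.filter_map]
  have part1 : (List.range (k + 1)).filter
      (fun i => decide (i = 0 ∨ (aa :: rest).getD i 'A' ≠ (aa :: rest).getD (i - 1) 'A')) = [0] := by
    rw [List.range_succ_eq_map, List.filter_cons, List.filter_map]
    have hzero : (decide ((0:Nat) = 0 ∨ (aa :: rest).getD 0 'A' ≠ (aa :: rest).getD (0 - 1) 'A')) = true := by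
      simp
    rw [hzero]
    have hnil : (List.range k).filter
        ((fun i => decide (i = 0 ∨ (aa :: rest).getD i 'A' ≠ (aa :: rest).getD (i - 1) 'A')) ∘ Nat.succ) = [] := by
      rw [List.filter_eq_nil_iff]
      intro i hi
      have hik : i < k := List.mem_range.mp hi
      have h1 : (aa :: rest).getD (i + 1) 'A' = aa := by
        simpa [List.getD_cons_succ] using pvCountLead_getD_lt aa rest i 'A' hik
      have h2 : (aa :: rest).getD i 'A' = aa := by
        cases i with
        | zero => simp
        | succ m =>
          simpa [List.getD_cons_succ] using pvCountLead_getD_lt aa rest m 'A' (by omega)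
      simp only [Function.comp_apply, Nat.succ_eq_add_one]
      simp only [decide_eq_true_eq]
      rintro (h0 | hne)
      · omega
      · have hm : i + 1 - 1 = i := rfl
        rw [hm, h1, h2] at hne
        exact hne rfl
    rw [hnil]
    simp
  rw [part1, List.singleton_append]
  congr 2
  apply List.filter_congr
  intro j hj
  have hjlt : j < (rest.drop k).length := List.mem_range.mp hj
  simpa [Function.comp] using pvStarts_P_congr aa rest j hjlt

theorem pvStarts_head (cs : List Char) (h : cs ≠ []) :
    ∃ t, pvStarts cs = 0 :: t := by
  match cs with
  | aa :: rest => exact ⟨_, pvStarts_cons aa rest⟩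

theorem pvPairs_cons (aa : Char) (rest : List Char) :
    pvPairs (aa :: rest)
      = (0, pvCountLead aa rest + 1)
        :: (pvPairs (rest.drop (pvCountLead aa rest))).map
             (fun p => (pvCountLead aa rest + 1 + p.1, pvCountLead aa rest + 1 + p.2)) := by
  set k := pvCountLead aa rest with hk
  set rest' := rest.drop k with hr
  have hlen : (aa :: rest).length = (k + 1) + rest'.length := by
    have := pvCountLead_le aa rest
    simp [hr, List.length_drop]; omega
  unfold pvPairs
  rw [pvStarts_cons aa rest, ← hk, ← hr]
  cases hrest' : rest' with
  | nil =>
    rw [hlen]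
    simp [pvStarts]
    exact hrest'
  | cons b t =>
    obtain ⟨t', ht'⟩ := pvStarts_head (b :: t) (by simp)
    rw [ht', hlen, hrest']
    simp only [List.map_cons, List.drop_succ_cons, List.drop_zero, List.cons_append,
      List.zip_cons_cons]
    congr 1
    have hmap : (List.map (fun j => k + 1 + j) t') ++ [k + 1 + (b :: t).length]
        = List.map (fun j => k + 1 + j) (t' ++ [(b :: t).length]) := by simp
    rw [hmap,
      show ((k + 1 + 0) :: List.map (fun j => k + 1 + j) t'
            = List.map (fun j => k + 1 + j) (0 :: t')) from rfl,
      List.zip_map]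
    apply List.map_congr_left
    intro p _
    rfl

theorem pvF_shift (aa : Char) (rest : List Char) (min_run : Int) (p : Nat × Nat) :
    pvF (aa :: rest) min_run (pvCountLead aa rest + 1 + p.1, pvCountLead aa rest + 1 + p.2)
      = ((pvF (rest.drop (pvCountLead aa rest)) min_run p).map
          (fun r => (((pvCountLead aa rest : Int) + 1) + r.1,
                     ((pvCountLead aa rest : Int) + 1) + r.2.1, r.2.2))) := by
  set k := pvCountLead aa rest with hk
  have hget : (aa :: rest).getD (k + 1 + p.1) 'A' = (rest.drop k).getD p.1 'A' := by
    rw [getD_drop]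
    have : k + 1 + p.1 = (k + p.1) + 1 := by omega
    rw [this, List.getD_cons_succ]
  unfold pvF
  rw [hget]
  have hsub : ((k + 1 + p.2 : Nat) : Int) - ((k + 1 + p.1 : Nat) : Int) = (p.2 : Int) - (p.1 : Int) := by
    push_cast; ring
  rw [hsub]
  split
  · simp only [Option.map_some]
    congr 1
  · rfl

theorem main_aux (min_run : Int) (n : Nat) :
    ∀ (cs : List Char), cs.length ≤ n → ∀ (i : Int),
      pvLoopA min_run cs i
        = ((pvPairs cs).filterMap (pvF cs min_run)).map
            (fun r => (i + r.1, i + r.2.1, r.2.2)) := by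
  induction n with
  | zero =>
    intro cs h i
    have : cs = [] := List.eq_nil_of_length_eq_zero (Nat.le_zero.mp h)
    subst this
    simp [pvLoopA, pvPairs, pvStarts]
  | succ m ih =>
    intro cs h i
    match cs with
    | [] => simp [pvLoopA, pvPairs, pvStarts]
    | aa :: rest =>
      rw [pvLoopA, pvPairs_cons, List.filterMap_cons]
      have hhead : pvF (aa :: rest) min_run (0, pvCountLead aa rest + 1)
          = if aa ≠ 'X' ∧ ((pvCountLead aa rest : Int) + 1) ≥ min_run
            then some (0, (pvCountLead aa rest : Int) + 1, String.ofList [aa]) else none := by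
        unfold pvF
        norm_num
      have htail : List.filterMap (pvF (aa :: rest) min_run)
            ((pvPairs (rest.drop (pvCountLead aa rest))).map
              (fun p => (pvCountLead aa rest + 1 + p.1, pvCountLead aa rest + 1 + p.2)))
          = ((pvPairs (rest.drop (pvCountLead aa rest))).filterMap
              (pvF (rest.drop (pvCountLead aa rest)) min_run)).map
              (fun r => (((pvCountLead aa rest : Int) + 1) + r.1,
                         ((pvCountLead aa rest : Int) + 1) + r.2.1, r.2.2)) := by
        rw [List.filterMap_map, List.map_filterMap]
        have hfun : ((pvF (aa :: rest) min_run) ∘ fun (p : Nat × Nat) =>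
              (pvCountLead aa rest + 1 + p.1, pvCountLead aa rest + 1 + p.2))
            = fun p => (pvF (rest.drop (pvCountLead aa rest)) min_run p).map
                (fun r => (((pvCountLead aa rest : Int) + 1) + r.1,
                           ((pvCountLead aa rest : Int) + 1) + r.2.1, r.2.2)) := by
          funext p
          exact pvF_shift aa rest min_run p
        rw [hfun]
      have hlen' : (rest.drop (pvCountLead aa rest)).length ≤ m := by
        simp only [List.length_cons] at h
        simp [List.length_drop]
        omega
      rw [hhead, htail, ih (rest.drop (pvCountLead aa rest)) hlen' (i + 1 + (pvCountLead aa rest : Int))]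
      have hcond : (i + 1 + (pvCountLead aa rest : Int)) - i = (pvCountLead aa rest : Int) + 1 := by
        ring
      rw [hcond]
      by_cases hc : aa ≠ 'X' ∧ (pvCountLead aa rest : Int) + 1 ≥ min_run
      · rw [if_pos hc, if_pos hc]
        simp only [List.map_cons, List.map_map]
        congr 1
        · simp only [Prod.mk.injEq]
          exact ⟨by ring, by ring, trivial⟩
        · apply List.map_congr_left
          intro r _
          simp only [Function.comp_apply, Prod.mk.injEq]
          exact ⟨by ring, by ring, trivial⟩
      · rw [if_neg hc, if_neg hc]
        simp only [List.map_map]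
        apply List.map_congr_left
        intro r _
        simp only [Function.comp_apply, Prod.mk.injEq]
        exact ⟨by ring, by ring, trivial⟩

theorem main_lemma (min_run : Int) (cs : List Char) (i : Int) :
    pvLoopA min_run cs i
      = ((pvPairs cs).filterMap (pvF cs min_run)).map
          (fun r => (i + r.1, i + r.2.1, r.2.2)) :=
  main_aux min_run cs.length cs le_rfl i

-- ===== VERDICT (by name: the statement is the Claim_ definition above) =====
theorem find_aa_homopolymers_spec : Claim_equal_find_aa_homopolymers := by
  intro protein min_run _
  unfold Spec_find_aa_homopolymers find_aa_homopolymers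
  rw [alt_eq, main_lemma]
  simp
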